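-- pv_equiv track=rewrite | github.com/R-Vries/AdventOfCode | Python/src/2023/day8.py | execute_all
-- ===== SOURCE A (Python) =====
-- def execute_all(mapping, instructions):
--     # Returns a mapping of each position to its position after executing all instructions
--     result = {}
--     for position in mapping:
--         new_pos = position
--         for instruction in instructions:
--             new_pos = execute(new_pos, mapping, instruction)
--         result.update({position: new_pos})
--     return result
--
-- def execute(position, mapping, step):
--     index = 0 if step == 'L' else 1
--     return mapping[position][index]
-- ===== SOURCE B (Python) =====
-- def execute_all(mapping, instructions):
--     # Compile the string network once into integer successor tables, run the whole
--     # walk on integer indices, and decode back to names only at the end.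
--     keys = list(mapping)
--     left = [keys.index(l) for l, r in mapping.values()]
--     right = [keys.index(r) for l, r in mapping.values()]
--     cur = list(range(len(keys)))
--     for instruction in instructions:
--         table = left if instruction == 'L' else right
--         cur = [table[i] for i in cur]
--     return {key: keys[i] for key, i in zip(keys, cur)}
-- ===== Notes on version B (the rewrite author's own statement) =====
-- stated objective: alternative
-- what changed: B compiles the string-keyed network once into two integer successor arrays (keys.index on each left/right target), advances a vector of integer indices through the instructions with plain list indexing instead of per-step dict lookups of strings, and decodes indices back to names only when building the result.
-- outside the precondition, e.g. on execute_all({'a': ('b', 'b')}, []): A returns {'a': 'a'}, B raises ValueError; on execute_all({'a': ('a', 'x'), 'b': ('a', 'a')}, ['L']): A returns {'a': 'a', 'b': 'a'}, B raises ValueError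
import Mathlib
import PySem

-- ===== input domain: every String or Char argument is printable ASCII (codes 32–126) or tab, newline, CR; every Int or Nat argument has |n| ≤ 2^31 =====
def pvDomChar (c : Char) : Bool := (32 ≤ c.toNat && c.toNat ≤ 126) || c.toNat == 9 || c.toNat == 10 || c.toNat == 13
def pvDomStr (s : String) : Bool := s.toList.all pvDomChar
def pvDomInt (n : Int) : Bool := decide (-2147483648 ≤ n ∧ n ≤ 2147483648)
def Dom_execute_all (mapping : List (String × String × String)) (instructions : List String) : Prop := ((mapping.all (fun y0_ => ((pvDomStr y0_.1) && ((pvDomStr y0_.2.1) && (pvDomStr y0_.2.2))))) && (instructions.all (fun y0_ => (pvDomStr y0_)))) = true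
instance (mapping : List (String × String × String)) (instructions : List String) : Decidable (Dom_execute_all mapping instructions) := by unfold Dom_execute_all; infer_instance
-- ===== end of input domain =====

-- B compiles the string network once to integer successor tables and walks on indices,
-- instead of A's per-step string dict lookups; alternative algorithm, decode-at-the-end.

-- ===== PORT A =====
-- mapping[position]: first-match lookup in the association list; Python raises KeyError when the
-- key is absent — those inputs are excluded by Pre_, the default pair is never the result there.
def pvLookup (mapping : List (String × String × String)) (k : String) : String × String :=
  match mapping.find? (fun e => e.1 == k) with
  | some e => e.2
  | none => ("", "")

-- port of helper 'execute'
def pvExecute (position : String) (mapping : List (String × String × String)) (step : String) : String :=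
  if step = "L" then (pvLookup mapping position).1 else (pvLookup mapping position).2

def execute_all (mapping : List (String × String × String)) (instructions : List String) : List (String × String) :=
  (mapping.foldl
    (fun (result : PySem.Dict String String) position =>
      result.insert position.1
        (instructions.foldl (fun new_pos instruction => pvExecute new_pos mapping instruction) position.1))
    PySem.Dict.empty).items

-- ===== PORT B =====
-- keys.index(t) raises ValueError when t is not a key — excluded by Pre_, the 0 default is never
-- the result there.  Indices are list positions (always nonnegative), carried as Nat; 'table[i]'
-- is total list indexing under Pre_ (the "" / 0 defaults are never reached).
def execute_all_alt (mapping : List (String × String × String)) (instructions : List String) : List (String × String) :=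
  let keys := mapping.map (fun e => e.1)
  let left := (mapping.map (fun e => e.2)).map (fun pr => (PySem.List.index? keys pr.1).getD 0)
  let right := (mapping.map (fun e => e.2)).map (fun pr => (PySem.List.index? keys pr.2).getD 0)
  let cur := instructions.foldl
    (fun (cur : List Nat) instruction =>
      let table := if instruction = "L" then left else right
      cur.map (fun i => table.getD i 0))
    (List.range keys.length)
  ((keys.zip cur).foldl
    (fun (d : PySem.Dict String String) kv => d.insert kv.1 (keys.getD kv.2 "")) PySem.Dict.empty).items

-- ===== PRECONDITION & SPEC =====
-- Pre_ restricts to the function's natural domain: distinct keys (duplicate keys are a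
-- dict-vs-association-list representation artefact) and a mapping closed under its left/right
-- targets — outside closure A raises KeyError as soon as any walk leaves the network (returning a
-- value only when every walk happens to stay inside), while B's compilation of the network to
-- index tables itself raises ValueError up front.
def Pre_execute_all (mapping : List (String × String × String)) (instructions : List String) : Prop :=
  (mapping.map (fun e => e.1)).Nodup ∧
  ∀ e ∈ mapping, e.2.1 ∈ mapping.map (fun e => e.1) ∧ e.2.2 ∈ mapping.map (fun e => e.1)

instance (mapping : List (String × String × String)) (instructions : List String) : Decidable (Pre_execute_all mapping instructions) := by
  unfold Pre_execute_all; infer_instance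

def pvWitness_execute_all : (List (String × String × String)) × List String :=
  ([("AAA", "BBB", "AAA"), ("BBB", "AAA", "BBB")], ["L", "R"])

def Spec_execute_all (mapping : List (String × String × String)) (instructions : List String) (out : List (String × String)) : Prop := out = execute_all_alt mapping instructions
instance (mapping : List (String × String × String)) (instructions : List String) (out : List (String × String)) : Decidable (Spec_execute_all mapping instructions out) := by unfold Spec_execute_all; infer_instance

-- ===== CLAIM (what is proved, stated in full; the proofs are below) =====
def Claim_equal_execute_all : Prop := ∀ (mapping : List (String × String × String)) (instructions : List String), Dom_execute_all mapping instructions → Pre_execute_all mapping instructions → Spec_execute_all mapping instructions (execute_all mapping instructions)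

-- ===== LEMMAS AND PROOFS =====

-- proof-side names for B's two successor tables (definitionally the port's let-bound lists)
def tblL (mapping : List (String × String × String)) : List Nat :=
  (mapping.map (fun e => e.2)).map (fun pr => (PySem.List.index? (mapping.map (fun e => e.1)) pr.1).getD 0)
def tblR (mapping : List (String × String × String)) : List Nat :=
  (mapping.map (fun e => e.2)).map (fun pr => (PySem.List.index? (mapping.map (fun e => e.1)) pr.2).getD 0)

-- A's loop over distinct fresh keys appends one item per mapping entry.
theorem executeAll_items (mapping : List (String × String × String)) (w : String → String)
    (hnd : (mapping.map (fun e => e.1)).Nodup) :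
    (mapping.foldl (fun (d : PySem.Dict String String) e => d.insert e.1 (w e.1)) PySem.Dict.empty).items
      = mapping.map (fun e => (e.1, w e.1)) := by
  have h := PySem.Dict.items_foldl_insert_fresh (l := mapping) (k := fun e => e.1)
      (v := fun e => w e.1) (d := PySem.Dict.empty)
      (by intro a _; simp [PySem.Dict.contains_empty]) hnd
  simpa using h

-- with distinct keys, A's first-match lookup at key l[j].1 returns exactly entry l[j]
theorem find_self (l : List (String × String × String)) (j : Nat) (hj : j < l.length)
    (hnd : (l.map (fun e => e.1)).Nodup) :
    l.find? (fun e => e.1 == l[j].1) = some l[j] := by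
  induction l generalizing j with
  | nil => simp at hj
  | cons h t ih =>
      cases j with
      | zero => simp [List.find?]
      | succ j =>
          have hj' : j < t.length := by simpa using hj
          have hmem : t[j].1 ∈ t.map (fun e => e.1) :=
            List.mem_map.2 ⟨t[j], List.getElem_mem hj', rfl⟩
          have hne : (h.1 == (t[j]).1) = false := by
            simp only [List.map_cons, List.nodup_cons] at hnd
            refine Bool.eq_false_iff.2 fun hb => hnd.1 ?_
            simpa [beq_iff_eq.1 hb] using hmem
          simp only [List.getElem_cons_succ, List.find?, hne]
          exact ih j hj' (by simp only [List.map_cons, List.nodup_cons] at hnd; exact hnd.2)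

-- one instruction on the index side computes A's one step on the name side, and stays in range
theorem step_correct (mapping : List (String × String × String))
    (hnd : (mapping.map (fun e => e.1)).Nodup)
    (hcl : ∀ e ∈ mapping, e.2.1 ∈ mapping.map (fun e => e.1) ∧ e.2.2 ∈ mapping.map (fun e => e.1))
    (ins : String) (j : Nat) (hj : j < mapping.length) :
    (if ins = "L" then tblL mapping else tblR mapping).getD j 0 < mapping.length ∧
      (mapping.map (fun e => e.1)).getD ((if ins = "L" then tblL mapping else tblR mapping).getD j 0) ""
        = pvExecute ((mapping.map (fun e => e.1)).getD j "") mapping ins := by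
  have hkeys : (mapping.map (fun e => e.1)).getD j "" = mapping[j].1 := by
    simp [List.getD, List.getElem?_eq_getElem hj]
  have hmem := hcl mapping[j] (List.getElem_mem hj)
  have hlook : pvLookup mapping (mapping[j].1) = mapping[j].2 := by
    simp [pvLookup, find_self mapping j hj hnd]
  have htgt : ∀ (t : String), t ∈ mapping.map (fun e => e.1) →
      ∃ k, PySem.List.index? (mapping.map (fun e => e.1)) t = some k ∧ k < mapping.length ∧
        (mapping.map (fun e => e.1)).getD k "" = t := by
    intro t ht
    have hs : (PySem.List.index? (mapping.map (fun e => e.1)) t).isSome :=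
      (PySem.List.index?_isSome_iff (mapping.map (fun e => e.1)) t).2 ht
    obtain ⟨k, hk⟩ := Option.isSome_iff_exists.1 hs
    obtain ⟨hklt, hkeq, _⟩ := PySem.List.getElem_of_index?_eq_some hk
    refine ⟨k, hk, by simpa using hklt, ?_⟩
    simp [List.getD, List.getElem?_eq_getElem hklt, hkeq]
  by_cases hins : ins = "L"
  · subst hins
    obtain ⟨k, hk, hklt, hkv⟩ := htgt mapping[j].2.1 hmem.1
    rw [PySem.List.index?_eq_idxOf?] at hk
    have hj' : (if ("L" : String) = "L" then tblL mapping else tblR mapping).getD j 0 = k := by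
      simp [tblL, List.getD, List.getElem?_eq_getElem hj, hk]
    rw [hj', hkeys]
    refine ⟨hklt, ?_⟩
    rw [hkv]
    simp [pvExecute, hlook]
  · obtain ⟨k, hk, hklt, hkv⟩ := htgt mapping[j].2.2 hmem.2
    rw [PySem.List.index?_eq_idxOf?] at hk
    have hj' : (if ins = "L" then tblL mapping else tblR mapping).getD j 0 = k := by
      simp [hins, tblR, List.getD, List.getElem?_eq_getElem hj, hk]
    rw [hj', hkeys]
    refine ⟨hklt, ?_⟩
    rw [hkv]
    simp [pvExecute, hins, hlook]

-- the whole index walk stays in range and decodes to A's whole name walk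
theorem walk_correct (mapping : List (String × String × String))
    (hnd : (mapping.map (fun e => e.1)).Nodup)
    (hcl : ∀ e ∈ mapping, e.2.1 ∈ mapping.map (fun e => e.1) ∧ e.2.2 ∈ mapping.map (fun e => e.1))
    (ins : List String) (j : Nat) (hj : j < mapping.length) :
    ins.foldl (fun j i => (if i = "L" then tblL mapping else tblR mapping).getD j 0) j < mapping.length ∧
      (mapping.map (fun e => e.1)).getD
          (ins.foldl (fun j i => (if i = "L" then tblL mapping else tblR mapping).getD j 0) j) ""
        = ins.foldl (fun p i => pvExecute p mapping i) ((mapping.map (fun e => e.1)).getD j "") := by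
  induction ins generalizing j with
  | nil => exact ⟨hj, rfl⟩
  | cons i ins ih =>
      obtain ⟨h1, h2⟩ := step_correct mapping hnd hcl i j hj
      obtain ⟨h3, h4⟩ := ih ((if i = "L" then tblL mapping else tblR mapping).getD j 0) h1
      rw [h2] at h4
      exact ⟨h3, h4⟩

-- B's outer fold over the instructions applied to a vector of indices is the pointwise walk
theorem foldl_map_comm (g : String → Nat → Nat) (ins : List String) (c : List Nat) :
    ins.foldl (fun c i => c.map (g i)) c = c.map (fun j => ins.foldl (fun j i => g i j) j) := by
  induction ins generalizing c with
  | nil => simp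
  | cons i ins ih => simp [List.foldl_cons, ih, List.map_map, Function.comp]

theorem execute_all_eq (mapping : List (String × String × String)) (instructions : List String)
    (hnd : (mapping.map (fun e => e.1)).Nodup)
    (hcl : ∀ e ∈ mapping, e.2.1 ∈ mapping.map (fun e => e.1) ∧ e.2.2 ∈ mapping.map (fun e => e.1)) :
    execute_all mapping instructions = execute_all_alt mapping instructions := by
  have hlen : (mapping.map (fun e => e.1)).length = mapping.length := by simp
  set keys := mapping.map (fun e => e.1) with hkeysdef
  set wA : String → String := fun p => instructions.foldl (fun p i => pvExecute p mapping i) p with hwA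
  set wN : Nat → Nat := fun j =>
    instructions.foldl (fun j i => (if i = "L" then tblL mapping else tblR mapping).getD j 0) j with hwN
  have hA : execute_all mapping instructions = mapping.map (fun e => (e.1, wA e.1)) :=
    executeAll_items mapping wA hnd
  have hcur : instructions.foldl
      (fun (cur : List Nat) instruction =>
        cur.map (fun i => (if instruction = "L" then tblL mapping else tblR mapping).getD i 0))
      (List.range keys.length)
      = (List.range keys.length).map wN :=
    foldl_map_comm (fun i j => (if i = "L" then tblL mapping else tblR mapping).getD j 0) instructions _
  have hfst : (keys.zip ((List.range keys.length).map wN)).map (fun kv => kv.1) = keys := by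
    have := List.map_fst_zip (l₁ := keys) (l₂ := (List.range keys.length).map wN) (by simp)
    simpa using this
  have hB : execute_all_alt mapping instructions
      = (keys.zip ((List.range keys.length).map wN)).map (fun kv => (kv.1, keys.getD kv.2 "")) := by
    show ((keys.zip (instructions.foldl
        (fun (cur : List Nat) instruction =>
          cur.map (fun i => (if instruction = "L" then tblL mapping else tblR mapping).getD i 0))
        (List.range keys.length))).foldl
        (fun (d : PySem.Dict String String) kv => d.insert kv.1 (keys.getD kv.2 "")) PySem.Dict.empty).items = _
    rw [hcur]
    have h := PySem.Dict.items_foldl_insert_fresh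
        (l := keys.zip ((List.range keys.length).map wN))
        (k := fun kv => kv.1) (v := fun kv => keys.getD kv.2 "") (d := PySem.Dict.empty)
        (by intro a _; simp [PySem.Dict.contains_empty]) (by rw [hfst]; exact hnd)
    simpa using h
  rw [hA, hB]
  apply List.ext_getElem
  · simp only [List.length_map, List.length_zip, List.length_range]; omega
  · intro j hj1 hj2
    have hjm : j < mapping.length := by simpa using hj1
    have hjk : j < keys.length := by omega
    have hz : (keys.zip ((List.range keys.length).map wN))[j]'(by simp [hjk]) = (keys[j]'hjk, wN j) := by
      simp [List.getElem_zip]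
    simp only [List.getElem_map, hz]
    obtain ⟨-, hw⟩ := walk_correct mapping hnd hcl instructions j hjm
    have hkj : keys.getD j "" = keys[j]'hjk := by
      simp [List.getD, List.getElem?_eq_getElem hjk]
    have hk1 : keys[j]'hjk = mapping[j].1 := by simp [hkeysdef]
    rw [Prod.mk.injEq]
    refine ⟨hk1.symm, ?_⟩
    show wA (mapping[j]'hjm).1 = keys.getD (wN j) ""
    rw [hwN]
    rw [show (mapping[j]'hjm).1 = keys.getD j "" by rw [hkj, hk1]]
    exact hw.symm

-- ===== VERDICT (by name: the statement is the Claim_ definition above) =====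
theorem execute_all_spec : Claim_equal_execute_all := by
  intro mapping instructions _ hpre
  unfold Spec_execute_all
  exact execute_all_eq mapping instructions hpre.1 hpre.2
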